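-- pv_equiv track=rewrite | github.com/RoryBarnes/vaibify | tests/testDockerfileNetworkRetries.py | flistFindRunBlocks
-- ===== SOURCE A (Python) =====
-- def flistFindRunBlocks(sSource):
--     """Return every ``RUN`` block in a Dockerfile as a list of strings.
--
--     A RUN block starts at a line whose first non-whitespace token is
--     ``RUN`` and continues across line continuations (``\\`` at end of
--     line) until a logical newline terminates it.
--     """
--     listLines = sSource.splitlines()
--     listBlocks = []
--     listCurrent = None
--     for sLine in listLines:
--         sStripped = sLine.lstrip()
--         if listCurrent is None:
--             if sStripped.startswith("RUN "):
--                 listCurrent = [sLine]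
--                 if not sLine.rstrip().endswith("\\"):
--                     listBlocks.append("\n".join(listCurrent))
--                     listCurrent = None
--         else:
--             listCurrent.append(sLine)
--             if not sLine.rstrip().endswith("\\"):
--                 listBlocks.append("\n".join(listCurrent))
--                 listCurrent = None
--     if listCurrent is not None:
--         listBlocks.append("\n".join(listCurrent))
--     return listBlocks
-- ===== SOURCE B (Python) =====
-- def flistFindRunBlocks(sSource):
--     """Return every ``RUN`` block in a Dockerfile as a list of strings.
--
--     Index-based scan: on a line whose first non-whitespace token is RUN,
--     an inner loop consumes continuation lines (trailing backslash) directly.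
--     """
--     listLines = sSource.splitlines()
--     listBlocks = []
--     i = 0
--     n = len(listLines)
--     while i < n:
--         sLine = listLines[i]
--         if sLine.lstrip().startswith("RUN "):
--             block = [sLine]
--             while block[-1].rstrip().endswith("\\") and i + 1 < n:
--                 i += 1
--                 block.append(listLines[i])
--             listBlocks.append("\n".join(block))
--         i += 1
--     return listBlocks
-- ===== Notes on version B (the rewrite author's own statement) =====
-- stated objective: alternative
-- what changed: Replaced A's single fold that threads an Option-typed accumulator for the block in progress by a two-level scan: an outer recursion over the lines plus an inner helper that consumes continuation lines directly, so no optional state is threaded.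
import Mathlib
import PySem

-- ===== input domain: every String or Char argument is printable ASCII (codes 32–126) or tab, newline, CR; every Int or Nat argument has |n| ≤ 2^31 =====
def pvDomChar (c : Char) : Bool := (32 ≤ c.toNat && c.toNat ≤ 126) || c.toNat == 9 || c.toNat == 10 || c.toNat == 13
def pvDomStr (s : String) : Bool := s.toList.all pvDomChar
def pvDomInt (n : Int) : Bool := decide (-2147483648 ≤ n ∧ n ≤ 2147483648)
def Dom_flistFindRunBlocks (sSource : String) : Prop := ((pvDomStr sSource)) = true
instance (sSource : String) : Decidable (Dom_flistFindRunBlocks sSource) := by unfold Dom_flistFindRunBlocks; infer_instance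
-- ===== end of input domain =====

-- B replaces A's Option-state fold by an outer line scan with an inner continuation-consuming helper (alternative decomposition, same cost).

-- ===== PORT A =====
-- step of A's for-loop: state = (listBlocks, listCurrent : Option (List String))
def pvStepA (st : List String × Option (List String)) (sLine : String) :
    List String × Option (List String) :=
  match st.2 with
  | none =>
    if PySem.Str.startswith (PySem.Str.lstrip sLine) "RUN " then
      if ¬ PySem.Str.endswith (PySem.Str.rstrip sLine) "\\" then
        (st.1 ++ [PySem.Str.join "\n" [sLine]], none)
      else (st.1, some [sLine])
    else (st.1, none)
  | some cur =>
    let cur' := cur ++ [sLine]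
    if ¬ PySem.Str.endswith (PySem.Str.rstrip sLine) "\\" then
      (st.1 ++ [PySem.Str.join "\n" cur'], none)
    else (st.1, some cur')

def flistFindRunBlocks (sSource : String) : List String :=
  let listLines := PySem.Str.splitlines sSource
  let st := listLines.foldl pvStepA ([], none)
  match st.2 with
  | none => st.1
  | some cur => st.1 ++ [PySem.Str.join "\n" cur]

-- ===== PORT B =====
-- inner while loop of B: given the last appended line `cur`, consume continuation lines
def pvCont (cur : String) (rest : List String) : List String × List String :=
  if PySem.Str.endswith (PySem.Str.rstrip cur) "\\" then
    match rest with
    | [] => ([], [])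
    | n :: r =>
      let p := pvCont n r
      (n :: p.1, p.2)
  else ([], rest)


theorem pvCont_snd_length_le (cur : String) (rest : List String) :
    (pvCont cur rest).2.length ≤ rest.length := by
  induction rest generalizing cur with
  | nil => unfold pvCont; split <;> simp
  | cons n r ih =>
    simp only [pvCont]
    split
    · simpa using Nat.le_succ_of_le (ih n)
    · simp

def pvScanB (lines : List String) : List String :=
  match lines with
  | [] => []
  | l :: rest =>
    if PySem.Str.startswith (PySem.Str.lstrip l) "RUN " then
      let p := pvCont l rest
      PySem.Str.join "\n" (l :: p.1) :: pvScanB p.2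
    else pvScanB rest
termination_by lines.length
decreasing_by
  · exact Nat.lt_succ_of_le (pvCont_snd_length_le l rest)
  · simp

def flistFindRunBlocks_alt (sSource : String) : List String :=
  pvScanB (PySem.Str.splitlines sSource)

-- ===== PRECONDITION & SPEC =====
def Spec_flistFindRunBlocks (sSource : String) (out : List String) : Prop := out = flistFindRunBlocks_alt sSource
instance (sSource : String) (out : List String) : Decidable (Spec_flistFindRunBlocks sSource out) := by unfold Spec_flistFindRunBlocks; infer_instance

-- ===== CLAIM (what is proved, stated in full; the proofs are below) =====
def Claim_equal_flistFindRunBlocks : Prop := ∀ (sSource : String), Dom_flistFindRunBlocks sSource → Spec_flistFindRunBlocks sSource (flistFindRunBlocks sSource)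

-- ===== LEMMAS AND PROOFS =====

-- finish A's fold state and run the remaining lines from the clean (no-current) state
def pvFinishA (lines : List String) (blocks : List String) : List String :=
  let st := lines.foldl pvStepA (blocks, none)
  match st.2 with
  | none => st.1
  | some cur => st.1 ++ [PySem.Str.join "\n" cur]


-- how pvStepA acts in each case, stated once so the inductions only rewrite
theorem pvStepA_none_norun (l : String) (blocks : List String)
    (h : PySem.Str.startswith (PySem.Str.lstrip l) "RUN " = false) :
    pvStepA (blocks, none) l = (blocks, none) := by
  simp only [pvStepA, h]; rfl

theorem pvStepA_none_run_close (l : String) (blocks : List String)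
    (h : PySem.Str.startswith (PySem.Str.lstrip l) "RUN " = true)
    (he : PySem.Str.endswith (PySem.Str.rstrip l) "\\" = false) :
    pvStepA (blocks, none) l = (blocks ++ [PySem.Str.join "\n" [l]], none) := by
  simp only [pvStepA, h, he]; rfl

theorem pvStepA_none_run_cont (l : String) (blocks : List String)
    (h : PySem.Str.startswith (PySem.Str.lstrip l) "RUN " = true)
    (he : PySem.Str.endswith (PySem.Str.rstrip l) "\\" = true) :
    pvStepA (blocks, none) l = (blocks, some [l]) := by
  simp only [pvStepA, h, he]; rfl

theorem pvStepA_some_close (l : String) (blocks cur : List String)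
    (he : PySem.Str.endswith (PySem.Str.rstrip l) "\\" = false) :
    pvStepA (blocks, some cur) l = (blocks ++ [PySem.Str.join "\n" (cur ++ [l])], none) := by
  simp only [pvStepA, he]; rfl

theorem pvStepA_some_cont (l : String) (blocks cur : List String)
    (he : PySem.Str.endswith (PySem.Str.rstrip l) "\\" = true) :
    pvStepA (blocks, some cur) l = (blocks, some (cur ++ [l])) := by
  simp only [pvStepA, he]; rfl

-- finish the fold started in the inside-a-block state
def pvFinishSome (rest : List String) (blocks acc : List String) : List String :=
  match (rest.foldl pvStepA (blocks, some acc)).2 with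
  | none => (rest.foldl pvStepA (blocks, some acc)).1
  | some c => (rest.foldl pvStepA (blocks, some acc)).1 ++ [PySem.Str.join "\n" c]

theorem pvInner (rest : List String) :
    ∀ (cur : String) (pre blocks : List String),
    PySem.Str.endswith (PySem.Str.rstrip cur) "\\" = true →
    pvFinishSome rest blocks (pre ++ [cur]) =
    pvFinishA (pvCont cur rest).2
      (blocks ++ [PySem.Str.join "\n" (pre ++ cur :: (pvCont cur rest).1)]) := by
  induction rest with
  | nil =>
    intro cur pre blocks h
    simp only [pvCont, h, if_pos]
    simp [pvFinishSome, pvFinishA]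
  | cons l r ih =>
    intro cur pre blocks h
    by_cases hl : PySem.Str.endswith (PySem.Str.rstrip l) "\\" = true
    · have step := pvStepA_some_cont l blocks (pre ++ [cur]) hl
      have hih := ih l (pre ++ [cur]) blocks hl
      simp only [pvCont, h, if_pos]
      simp only [pvFinishSome, List.foldl_cons, step] at *
      rw [show pre ++ [cur] ++ [l] = (pre ++ [cur]) ++ [l] from rfl, hih]
      simp [List.append_assoc]
    · have hl' : PySem.Str.endswith (PySem.Str.rstrip l) "\\" = false := by
        simpa using hl
      have step := pvStepA_some_close l blocks (pre ++ [cur]) hl'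
      have hc : pvCont l r = ([], r) := by
        unfold pvCont; rw [if_neg (by simpa using hl')]
      simp only [pvCont, h, if_pos, hc]
      simp only [pvFinishSome, List.foldl_cons, step]
      simp [pvFinishA, List.append_assoc]

theorem pvMain (lines : List String) (blocks : List String) :
    pvFinishA lines blocks = blocks ++ pvScanB lines := by
  match lines with
  | [] => simp [pvFinishA, pvScanB]
  | l :: rest =>
    rw [pvScanB]
    by_cases hr : PySem.Str.startswith (PySem.Str.lstrip l) "RUN " = true
    · by_cases he : PySem.Str.endswith (PySem.Str.rstrip l) "\\" = true
      · have step := pvStepA_none_run_cont l blocks hr he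
        have hin := pvInner rest l [] blocks he
        have hrec := pvMain (pvCont l rest).2
          (blocks ++ [PySem.Str.join "\n" (l :: (pvCont l rest).1)])
        simp only [List.nil_append] at hin
        simp only [pvFinishA, List.foldl_cons, step, hr, if_pos]
        calc pvFinishSome rest blocks [l] = _ := hin
          _ = _ := by
              simp only [pvFinishA] at hrec ⊢
              rw [hrec]; simp
      · have he' : PySem.Str.endswith (PySem.Str.rstrip l) "\\" = false := by
          simpa using he
        have step := pvStepA_none_run_close l blocks hr he'
        have hrec := pvMain rest (blocks ++ [PySem.Str.join "\n" [l]])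
        simp only [pvFinishA, List.foldl_cons, step, hr, if_pos] at hrec ⊢
        have hc : pvCont l rest = ([], rest) := by
          unfold pvCont; rw [if_neg (by simpa using he')]
        rw [hrec, hc]
        simp
    · have hr' : PySem.Str.startswith (PySem.Str.lstrip l) "RUN " = false := by
        simpa using hr
      have step := pvStepA_none_norun l blocks hr'
      have hrec := pvMain rest blocks
      simp only [pvFinishA, List.foldl_cons, step, hr', Bool.false_eq_true] at hrec ⊢
      rw [hrec]
      simp
termination_by lines.length
decreasing_by
  · exact Nat.lt_succ_of_le (pvCont_snd_length_le l rest)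
  · simp
  · simp

-- ===== VERDICT (by name: the statement is the Claim_ definition above) =====
theorem flistFindRunBlocks_spec : Claim_equal_flistFindRunBlocks := by
  intro sSource _
  unfold Spec_flistFindRunBlocks flistFindRunBlocks flistFindRunBlocks_alt
  simpa [pvFinishA] using pvMain (PySem.Str.splitlines sSource) []
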